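-- pv_equiv track=rewrite | github.com/koii-network/prometheus-beta | src/dot_case_converter.py | convert_to_dot_case
-- ===== SOURCE A (Python) =====
-- def convert_to_dot_case(input_string):
--     """
--     Convert a given string to dot case.
--
--     Dot case is a string formatting where words are separated by dots,
--     and all characters are lowercase.
--
--     Args:
--         input_string (str): The input string to convert.
--
--     Returns:
--         str: The input string converted to dot case.
--
--     Raises:
--         TypeError: If the input is not a string.
--
--     Examples:
--         >>> convert_to_dot_case("HelloWorld")
--         'hello.world'
--         >>> convert_to_dot_case("snake_case_string")
--         'snake.case.string'
--         >>> convert_to_dot_case("CamelCaseString")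
--         'camel.case.string'
--     """
--     # Check input type
--     if not isinstance(input_string, str):
--         raise TypeError("Input must be a string")
--
--     # If input is empty, return empty string
--     if not input_string:
--         return ""
--
--     # Convert string to lowercase
--     lowercase_str = input_string.lower()
--
--     # Replace common separators with dots
--     replacements = [
--         ('_', '.'),   # snake_case
--         ('-', '.'),   # kebab-case
--         (' ', '.'),   # space-separated
--     ]
--
--     # Apply replacements
--     for old, new in replacements:
--         lowercase_str = lowercase_str.replace(old, '.')
--
--     # Handle camelCase and PascalCase
--     result = []
--     for i, char in enumerate(lowercase_str):
--         # Add dot before uppercase letters (in original input)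
--         if (i > 0 and
--             input_string[i].isupper() and
--             input_string[i-1].islower()):
--             result.append('.')
--         result.append(char)
--
--     # Convert to string and remove consecutive dots
--     final_str = ''.join(result)
--     while '..' in final_str:
--         final_str = final_str.replace('..', '.')
--
--     # Remove leading or trailing dots
--     return final_str.strip('.')
-- ===== SOURCE B (Python) =====
-- def convert_to_dot_case(input_string):
--     # Single pass with a pending-separator flag: no replace passes, no collapse loop.
--     if not isinstance(input_string, str):
--         raise TypeError("Input must be a string")
--     out = []
--     pending = False
--     for i, ch in enumerate(input_string):
--         if ch in '_-. ':
--             pending = True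
--         else:
--             if i > 0 and ch.isupper() and input_string[i - 1].islower():
--                 pending = True
--             if pending and out:
--                 out.append('.')
--             out.append(ch.lower())
--             pending = False
--     return ''.join(out)
-- ===== Notes on version B (the rewrite author's own statement) =====
-- stated objective: simpler
-- what changed: Replaced A's multi-pass pipeline (lowercase, three replace passes, dot-insertion list build, repeated '..'-collapse while-loop, final strip) by one left-to-right pass with a pending-separator flag that emits a single dot between words.
import Mathlib
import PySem

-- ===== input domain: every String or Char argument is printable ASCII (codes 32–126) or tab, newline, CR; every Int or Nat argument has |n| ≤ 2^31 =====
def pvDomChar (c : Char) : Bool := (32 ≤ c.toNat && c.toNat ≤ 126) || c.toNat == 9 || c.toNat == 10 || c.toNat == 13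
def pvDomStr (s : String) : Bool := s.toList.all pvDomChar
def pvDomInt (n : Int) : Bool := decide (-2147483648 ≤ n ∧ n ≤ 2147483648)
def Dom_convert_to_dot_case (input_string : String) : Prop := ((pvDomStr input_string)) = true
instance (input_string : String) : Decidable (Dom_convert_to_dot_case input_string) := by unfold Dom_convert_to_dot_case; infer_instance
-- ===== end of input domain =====

-- B is one left-to-right pass with a pending-separator flag instead of A's replace/insert/collapse/strip pipeline (objective: simpler).

-- ===== PORT A =====
-- Python's `while '..' in final_str: final_str = final_str.replace('..','.')`; the fuel argument
-- only makes the loop total (each iteration strictly shrinks the string, so length+1 fuel suffices).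
def pvLoopA : Nat → List Char → List Char
  | 0, l => l
  | fuel + 1, l =>
    if PySem.Chars.isIn ['.', '.'] l then pvLoopA fuel (PySem.Chars.replace l ['.', '.'] ['.'])
    else l

def convert_to_dot_case (input_string : String) : String :=
  if input_string.toList.isEmpty then "" else
  let l0 := input_string.toList
  let lowercase0 := PySem.Chars.lower l0
  -- for old, new in replacements: lowercase_str = lowercase_str.replace(old, '.')
  let lowercase := [('_', '.'), ('-', '.'), (' ', '.')].foldl
      (fun s (p : Char × Char) => PySem.Chars.replace s [p.1] ['.']) lowercase0
  -- for i, char in enumerate(lowercase_str): … (input_string[i] is always in range here: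
  -- lower/replace preserve length, so pyGetD's default is never used)
  let result := (PySem.List.enumerate lowercase 0).foldl
      (fun acc ic =>
        (if 0 < ic.1 ∧ PySem.Chars.isupper (PySem.List.pyGetD l0 ic.1 ' ') = true ∧
            PySem.Chars.islower (PySem.List.pyGetD l0 (ic.1 - 1) ' ') = true
         then acc ++ ['.'] else acc) ++ [ic.2]) []
  let final := pvLoopA (result.length + 1) result
  String.mk (PySem.Chars.stripChars final ['.'])

-- ===== PORT B =====
def convert_to_dot_case_alt (input_string : String) : String :=
  let l0 := input_string.toList
  let st := (PySem.List.enumerate l0 0).foldl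
      (fun (s : List Char × Bool) ic =>
        if ic.2 ∈ ['_', '-', '.', ' '] then (s.1, true)
        else
          let pend := s.2 ∨ (0 < ic.1 ∧ PySem.Chars.isupper ic.2 = true ∧
              PySem.Chars.islower (PySem.List.pyGetD l0 (ic.1 - 1) ' ') = true)
          (s.1 ++ (if pend ∧ s.1 ≠ [] then ['.', PySem.Chars.lowerChar ic.2]
                   else [PySem.Chars.lowerChar ic.2]), false))
      ([], false)
  String.mk st.1

-- ===== PRECONDITION & SPEC =====
def Spec_convert_to_dot_case (input_string : String) (out : String) : Prop := out = convert_to_dot_case_alt input_string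
instance (input_string : String) (out : String) : Decidable (Spec_convert_to_dot_case input_string out) := by unfold Spec_convert_to_dot_case; infer_instance

-- ===== CLAIM (what is proved, stated in full; the proofs are below) =====
def Claim_equal_convert_to_dot_case : Prop := ∀ (input_string : String), Dom_convert_to_dot_case input_string → Spec_convert_to_dot_case input_string (convert_to_dot_case input_string)

-- ===== LEMMAS AND PROOFS =====

-- proof-side helpers (characterisations of both programs; not used by the ports)
def pvF (c : Char) : Char :=
  if c = '_' ∨ c = '-' ∨ c = ' ' then '.' else PySem.Chars.lowerChar c

def pvRep2 : List Char → List Char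
  | '.' :: '.' :: t => '.' :: pvRep2 t
  | c :: t => c :: pvRep2 t
  | [] => []

def pvHasDD : List Char → Bool
  | '.' :: '.' :: _ => true
  | _ :: t => pvHasDD t
  | [] => false

def pvG : Bool → List Char → List Char
  | _, [] => []
  | _, '.' :: t => pvG true t
  | false, c :: t => c :: pvG false t
  | true, c :: t => '.' :: c :: pvG false t

def pvH : List Char → List Char
  | [] => []
  | '.' :: t => pvH t
  | c :: t => c :: pvG false t

def pvM (s : List Char × Bool) (c : Char) : List Char × Bool :=
  if c = '.' then (s.1, true)
  else (s.1 ++ (if s.2 ∧ s.1 ≠ [] then ['.', c] else [c]), false)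

def pvContrib (l0 : List Char) (ic : Int × Char) : List Char :=
  (if 0 < ic.1 ∧ PySem.Chars.isupper ic.2 = true ∧
      PySem.Chars.islower (PySem.List.pyGetD l0 (ic.1 - 1) ' ') = true
   then ['.'] else []) ++ [pvF ic.2]

def pvRS (l : List Char) : List Char :=
  (List.dropWhile (fun c => c == '.') l.reverse).reverse

-- character facts
theorem pvToNat_ofNat (n : Nat) (h : n < 55296) : (Char.ofNat n).toNat = n := by
  unfold Char.ofNat
  rw [dif_pos (by exact Or.inl h)]
  rfl

theorem pvLower_toNat (c : Char) (h : PySem.Chars.isupper c = true) :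
    (PySem.Chars.lowerChar c).toNat = c.toNat + 32 := by
  have hb : c.toNat ≤ 90 := by
    simp [PySem.Chars.isupper] at h
    exact h.2
  simp only [PySem.Chars.lowerChar, h, if_true]
  exact pvToNat_ofNat _ (by omega)

theorem pvLower_toNat' (c : Char) (h : PySem.Chars.isupper c = true) :
    97 ≤ (PySem.Chars.lowerChar c).toNat ∧ (PySem.Chars.lowerChar c).toNat ≤ 122 := by
  have h1 := pvLower_toNat c h
  simp only [PySem.Chars.isupper, Bool.and_eq_true, decide_eq_true_eq] at h
  have hA : ('A' : Char).toNat ≤ c.toNat := Fin.mk_le_mk.mp h.1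
  have hZ : c.toNat ≤ ('Z' : Char).toNat := Fin.mk_le_mk.mp h.2
  have eA : ('A' : Char).toNat = 65 := rfl
  have eZ : ('Z' : Char).toNat = 90 := rfl
  omega

theorem pvLower_eq_self (c : Char) (h : PySem.Chars.isupper c = false) :
    PySem.Chars.lowerChar c = c := by
  simp [PySem.Chars.lowerChar, h]

theorem pvLower_ne_dot (c : Char) (h : c ≠ '.') : PySem.Chars.lowerChar c ≠ '.' := by
  by_cases hu : PySem.Chars.isupper c = true
  · intro he
    have ht := pvLower_toNat c hu
    rw [he] at ht
    have h46 : ('.' : Char).toNat = 46 := rfl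
    simp only [PySem.Chars.isupper, Bool.and_eq_true, decide_eq_true_eq] at hu
    have h65 : ('A' : Char).toNat ≤ c.toNat := Fin.mk_le_mk.mp hu.1
    have hA : ('A' : Char).toNat = 65 := rfl
    omega
  · rw [pvLower_eq_self c (by simpa using hu)]
    exact h

theorem pvChain_pointwise (c : Char) :
    (fun x => if x = ' ' then '.' else x)
      ((fun x => if x = '-' then '.' else x)
        ((fun x => if x = '_' then '.' else x) (PySem.Chars.lowerChar c))) = pvF c := by
  by_cases hd : c = '_' ∨ c = '-' ∨ c = ' '
  · rcases hd with h | h | h <;> subst h <;> rfl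
  · rw [not_or, not_or] at hd
    obtain ⟨h1, h2, h3⟩ := hd
    rw [pvF, if_neg (by tauto)]
    by_cases hu : PySem.Chars.isupper c = true
    · have hr := pvLower_toNat' c hu
      have e1 : PySem.Chars.lowerChar c ≠ '_' := by
        intro he; rw [he] at hr; simp [Char.toNat] at hr
      have e2 : PySem.Chars.lowerChar c ≠ '-' := by
        intro he; rw [he] at hr; simp [Char.toNat] at hr
      have e3 : PySem.Chars.lowerChar c ≠ ' ' := by
        intro he; rw [he] at hr; simp [Char.toNat] at hr
      simp [e1, e2, e3]
    · rw [pvLower_eq_self c (by simpa using hu)]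
      simp [h1, h2, h3]

-- single-character replace is a map
theorem pvGo_single (a b : Char) : ∀ (l : List Char) (fuel : Nat) (acc : List Char),
    l.length ≤ fuel →
    PySem.Chars.replace.go [a] [b] fuel l acc =
      acc.reverse ++ l.map (fun c => if c = a then b else c) := by
  intro l
  induction l with
  | nil =>
    intro fuel acc h
    cases fuel <;> simp [PySem.Chars.replace.go]
  | cons c t ih =>
    intro fuel acc h
    cases fuel with
    | zero => simp at h
    | succ f =>
      simp only [PySem.Chars.replace.go]
      by_cases hc : c = a
      · subst hc
        simp [List.isPrefixOf, ih f (b :: acc) (by simpa using h)]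
      · have hp : [a].isPrefixOf (c :: t) = false := by
          simp [List.isPrefixOf, BEq.beq]
          exact fun h' => (hc h'.symm).elim
        simp [hp, hc, ih f (c :: acc) (by simpa using h)]

theorem pvReplace_single (a b : Char) (l : List Char) :
    PySem.Chars.replace l [a] [b] = l.map (fun c => if c = a then b else c) := by
  simp [PySem.Chars.replace, pvGo_single a b l l.length [] le_rfl]

theorem pvLowerChain (l : List Char) :
    ([('_', '.'), ('-', '.'), (' ', '.')].foldl
        (fun s (p : Char × Char) => PySem.Chars.replace s [p.1] ['.'])
        (PySem.Chars.lower l)) = l.map pvF := by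
  simp only [List.foldl_cons, List.foldl_nil]
  rw [pvReplace_single, pvReplace_single, pvReplace_single]
  simp only [PySem.Chars.lower, List.map_map]
  exact List.map_congr_left (fun c _ => pvChain_pointwise c)

-- the '..' → '.' replace pass
theorem pvGo_dd : ∀ (l : List Char) (fuel : Nat) (acc : List Char),
    l.length ≤ fuel →
    PySem.Chars.replace.go ['.', '.'] ['.'] fuel l acc = acc.reverse ++ pvRep2 l := by
  intro l
  induction l using pvRep2.induct with
  | case1 t ih =>
    intro fuel acc h
    cases fuel with
    | zero => simp at h
    | succ f =>
      simp only [PySem.Chars.replace.go]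
      have hp : (['.', '.'] : List Char).isPrefixOf ('.' :: '.' :: t) = true := by
        simp [List.isPrefixOf]
      simp [hp, pvRep2, ih f ('.' :: acc) (by simp at h; omega)]
  | case2 c t hne ih =>
    intro fuel acc h
    cases fuel with
    | zero => simp at h
    | succ f =>
      simp only [PySem.Chars.replace.go]
      have hp : (['.', '.'] : List Char).isPrefixOf (c :: t) = false := by
        cases t with
        | nil => simp [List.isPrefixOf]
        | cons d u =>
          simp [List.isPrefixOf]
          intro h1 h2
          have hne' : c = '.' → ¬ d = '.' := by simpa using hne
          exact hne' h1.symm h2.symm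
      simp [hp, pvRep2, ih f (c :: acc) (by simp at h; omega)]
  | case3 => intro fuel acc h; cases fuel <;> simp [PySem.Chars.replace.go, pvRep2]

theorem pvReplace_dd (l : List Char) :
    PySem.Chars.replace l ['.', '.'] ['.'] = pvRep2 l := by
  simp [PySem.Chars.replace, pvGo_dd l l.length [] le_rfl]

theorem pvHasDD_iff (l : List Char) : pvHasDD l = true ↔ ['.', '.'] <:+: l := by
  induction l using pvHasDD.induct with
  | case1 t => simp [pvHasDD]; exact ⟨[], t, rfl⟩
  | case2 c t hne ih =>
    rw [show pvHasDD (c :: t) = pvHasDD t from by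
      cases t with
      | nil => simp [pvHasDD]
      | cons d u =>
        by_cases hc : c = '.' <;> by_cases hd : d = '.' <;> simp_all [pvHasDD]]
    rw [ih, List.infix_cons_iff]
    constructor
    · exact Or.inr
    · rintro (hpre | hin)
      · exfalso
        obtain ⟨r, hr⟩ := hpre
        have h1 : c = '.' := by injection hr with ha hb; exact ha.symm
        have h2 : t = '.' :: r := by injection hr with ha hb; exact hb.symm
        exact hne r h1 h2
      · exact hin
  | case3 => simp [pvHasDD]

theorem pvIsIn_dd (l : List Char) : PySem.Chars.isIn ['.', '.'] l = pvHasDD l := by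
  by_cases h : pvHasDD l = true
  · rw [h]; exact (PySem.Chars.isIn_iff_infix _ _).mpr ((pvHasDD_iff l).mp h)
  · have hf := (Bool.not_eq_true _).mp h
    rw [hf, PySem.Chars.isIn_eq_false_iff]
    intro hc
    exact h ((pvHasDD_iff l).mpr hc)

theorem pvRep2_len (l : List Char) :
    (pvHasDD l = true → (pvRep2 l).length < l.length) ∧ (pvRep2 l).length ≤ l.length := by
  induction l using pvRep2.induct with
  | case1 t ih =>
    simp [pvRep2, pvHasDD]
    omega
  | case2 c t hne ih =>
    constructor
    · intro h
      have ht : pvHasDD t = true := by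
        cases t with
        | nil => simp [pvHasDD] at h
        | cons d u =>
          by_cases hc : c = '.' <;> by_cases hd : d = '.' <;> simp_all [pvHasDD]
      have := ih.1 ht
      simp [pvRep2]
      omega
    · have := ih.2
      simp [pvRep2]
      omega
  | case3 => simp [pvRep2, pvHasDD]

theorem pvG_rep2 (l : List Char) : ∀ p, pvG p (pvRep2 l) = pvG p l := by
  induction l using pvRep2.induct with
  | case1 t ih => intro p; simp [pvRep2, pvG, ih]
  | case2 c t hne ih =>
    intro p
    by_cases hc : c = '.'
    · subst hc
      simp [pvRep2, pvG, ih]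
    · cases p <;> simp [pvRep2, pvG, ih]
  | case3 => intro p; simp [pvRep2]

theorem pvH_rep2 (l : List Char) : pvH (pvRep2 l) = pvH l := by
  induction l using pvRep2.induct with
  | case1 t ih => simp [pvRep2, pvH, ih]
  | case2 c t hne ih =>
    by_cases hc : c = '.'
    · subst hc
      simp [pvRep2, pvH, ih]
    · simp [pvRep2, pvH, pvG_rep2]
  | case3 => simp [pvRep2]

-- the final strip as a recursion
theorem pvRS_cons (c : Char) (x : List Char) :
    pvRS (c :: x) = if c = '.' then (if pvRS x = [] then [] else '.' :: pvRS x)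
                    else c :: pvRS x := by
  unfold pvRS
  simp only [List.reverse_cons, List.dropWhile_append]
  by_cases hc : c = '.' <;>
    by_cases he : (List.dropWhile (fun c => c == '.') x.reverse) = [] <;>
      simp [hc, he, List.isEmpty_iff]

theorem pvRS_eq_g (t : List Char) (h : pvHasDD t = false) : pvRS t = pvG false t := by
  induction t using pvHasDD.induct with
  | case1 u => simp [pvHasDD] at h
  | case2 c t hne ih =>
    have ht : pvHasDD t = false := by
      cases t with
      | nil => simp [pvHasDD]
      | cons d u => by_cases hc : c = '.' <;> by_cases hd : d = '.' <;> simp_all [pvHasDD]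
    by_cases hc : c = '.'
    · subst hc
      cases t with
      | nil => simp [pvRS, pvG]
      | cons d u =>
        have hd : d ≠ '.' := by
          intro hd; exact hne u rfl (by rw [hd])
        rw [pvRS_cons, if_pos rfl, ih ht]
        simp [pvG]
    · rw [pvRS_cons]
      simp only [if_neg hc]
      rw [ih ht]
      cases t with
      | nil => simp [pvG]
      | cons d u => by_cases hd : d = '.' <;> simp [pvG]
  | case3 => simp [pvRS, pvG]

theorem pvStrip_eq_rs (l : List Char) :
    PySem.Chars.stripChars l ['.'] = pvRS (List.dropWhile (fun c => c == '.') l) := by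
  simp [PySem.Chars.stripChars, pvRS]
  congr 1

theorem pvStrip_eq_h (l : List Char) (h : pvHasDD l = false) :
    PySem.Chars.stripChars l ['.'] = pvH l := by
  rw [pvStrip_eq_rs]
  induction l with
  | nil => simp [pvRS, pvH]
  | cons c t ih =>
    by_cases hc : c = '.'
    · subst hc
      simp only [List.dropWhile_cons]
      rw [if_pos (by simp)]
      have ht : pvHasDD t = false := by
        cases t with
        | nil => simp [pvHasDD]
        | cons d u => by_cases hd : d = '.' <;> simp_all [pvHasDD]
      rw [ih ht]
      simp [pvH]
    · simp only [List.dropWhile_cons]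
      rw [if_neg (by simp [hc])]
      have ht : pvHasDD t = false := by
        cases t with
        | nil => simp [pvHasDD]
        | cons d u => simp_all [pvHasDD]
      rw [pvRS_cons]
      simp only [if_neg hc]
      rw [pvRS_eq_g t ht]
      simp [pvH]

-- the collapse while-loop computes pvH after the strip
theorem pvLoop_h : ∀ (fuel : Nat) (l : List Char), l.length < fuel →
    PySem.Chars.stripChars (pvLoopA fuel l) ['.'] = pvH l := by
  intro fuel
  induction fuel with
  | zero => intro l h; omega
  | succ f ih =>
    intro l h
    simp only [pvLoopA, pvIsIn_dd]
    by_cases hdd : pvHasDD l = true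
    · rw [if_pos (by simp [hdd]), pvReplace_dd]
      rw [ih _ (by have := (pvRep2_len l).1 hdd; omega)]
      exact pvH_rep2 l
    · rw [if_neg (by simp_all)]
      exact pvStrip_eq_h l (by simpa using hdd)

-- B's machine
theorem pvFoldM_ne : ∀ (t : List Char) (o : List Char) (p : Bool), o ≠ [] →
    (t.foldl pvM (o, p)).1 = o ++ pvG p t := by
  intro t
  induction t with
  | nil => intro o p _; simp [pvG]
  | cons c r ih =>
    intro o p ho
    by_cases hc : c = '.'
    · subst hc
      simp only [List.foldl_cons, pvM, reduceIte]
      rw [ih o true ho]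
      simp [pvG]
    · simp only [List.foldl_cons, pvM, if_neg hc]
      rw [ih _ false (by simp [ho])]
      cases p <;> simp [pvG, ho]

theorem pvFoldM_nil : ∀ (t : List Char) (p : Bool),
    (t.foldl pvM ([], p)).1 = pvH t := by
  intro t
  induction t with
  | nil => intro p; simp [pvH]
  | cons c r ih =>
    intro p
    by_cases hc : c = '.'
    · subst hc
      simp only [List.foldl_cons, pvM, reduceIte]
      rw [ih true]
      simp [pvH]
    · simp only [List.foldl_cons, pvM, if_neg hc]
      simp only [ne_eq, not_true_eq_false, and_false, if_false]
      rw [pvFoldM_ne r ([] ++ [c]) false (by simp)]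
      simp [pvH]

-- enumerate over a mapped list
theorem pvEnumMap {α β : Type} (f : α → β) : ∀ (l : List α) (s : Int),
    PySem.List.enumerate (l.map f) s =
      (PySem.List.enumerate l s).map (fun ic => (ic.1, f ic.2)) := by
  intro l
  induction l with
  | nil => intro s; simp [PySem.List.enumerate_nil]
  | cons a t ih => intro s; simp [PySem.List.enumerate_cons, ih]

-- indexing an enumerate member
theorem pvGetD_enum (l0 : List Char) (ic : Int × Char)
    (h : ic ∈ PySem.List.enumerate l0 0) :
    PySem.List.pyGetD l0 ic.1 ' ' = ic.2 := by
  rw [PySem.List.mem_enumerate_iff] at h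
  obtain ⟨k, hk, rfl⟩ := h
  simp [PySem.List.pyGetD_natCast, List.getD_eq_getElem?_getD, hk]

-- A's insertion pass produces the flatMap of contributions
theorem pvA_result (l0 : List Char) :
    (PySem.List.enumerate (l0.map pvF) 0).foldl
      (fun acc ic =>
        (if 0 < ic.1 ∧ PySem.Chars.isupper (PySem.List.pyGetD l0 ic.1 ' ') = true ∧
            PySem.Chars.islower (PySem.List.pyGetD l0 (ic.1 - 1) ' ') = true
         then acc ++ ['.'] else acc) ++ [ic.2]) [] =
    (PySem.List.enumerate l0 0).flatMap (pvContrib l0) := by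
  rw [pvEnumMap, List.foldl_map]
  rw [List.foldl_ext _ (fun acc ic => acc ++ pvContrib l0 ic) []
    (fun acc ic hm => by
      simp only [pvContrib]
      rw [pvGetD_enum l0 ic hm]
      by_cases hcond : 0 < ic.1 ∧ PySem.Chars.isupper ic.2 = true ∧
          PySem.Chars.islower (PySem.List.pyGetD l0 (ic.1 - 1) ' ') = true <;>
        simp [hcond])]
  exact PySem.List.foldl_append_eq_flatMap _ _ []

-- B's step equals running the machine over the contribution
theorem pvB_step (l0 : List Char) (ic : Int × Char) (s : List Char × Bool) :
    (if ic.2 ∈ ['_', '-', '.', ' '] then (s.1, true)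
     else
       ((s.1 ++ (if (s.2 ∨ (0 < ic.1 ∧ PySem.Chars.isupper ic.2 = true ∧
              PySem.Chars.islower (PySem.List.pyGetD l0 (ic.1 - 1) ' ') = true)) ∧ s.1 ≠ []
                 then ['.', PySem.Chars.lowerChar ic.2]
                 else [PySem.Chars.lowerChar ic.2]), false))) =
    (pvContrib l0 ic).foldl pvM s := by
  by_cases hd : ic.2 ∈ (['_', '-', '.', ' '] : List Char)
  · have hd' : ic.2 = '_' ∨ ic.2 = '-' ∨ ic.2 = '.' ∨ ic.2 = ' ' := by
      simpa using hd
    have hup : PySem.Chars.isupper ic.2 = false := by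
      rcases hd' with h | h | h | h <;> rw [h] <;> rfl
    have hF : pvF ic.2 = '.' := by
      rcases hd' with h | h | h | h <;> rw [h] <;> rfl
    simp [hd, pvContrib, hup, hF, pvM]
  · have hne : ic.2 ≠ '.' := by intro h; exact hd (by rw [h]; simp)
    have hF : pvF ic.2 = PySem.Chars.lowerChar ic.2 := by
      rw [pvF, if_neg]
      intro h
      rcases h with h | h | h <;> exact hd (by rw [h]; simp)
    have hld : PySem.Chars.lowerChar ic.2 ≠ '.' := pvLower_ne_dot ic.2 hne
    rw [if_neg hd]
    simp only [pvContrib, hF]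
    by_cases hcond : 0 < ic.1 ∧ PySem.Chars.isupper ic.2 = true ∧
        PySem.Chars.islower (PySem.List.pyGetD l0 (ic.1 - 1) ' ') = true
    · simp only [if_pos hcond, List.cons_append, List.nil_append, List.foldl_cons,
        List.foldl_nil, pvM, reduceIte, if_neg hld]
      simp [hcond]
    · simp only [if_neg hcond, List.nil_append, List.foldl_cons, List.foldl_nil,
        pvM, if_neg hld]
      simp [hcond]

theorem pvB_fold (l0 : List Char) :
    ((PySem.List.enumerate l0 0).foldl
      (fun (s : List Char × Bool) ic =>
        if ic.2 ∈ ['_', '-', '.', ' '] then (s.1, true)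
        else
          ((s.1 ++ (if (s.2 ∨ (0 < ic.1 ∧ PySem.Chars.isupper ic.2 = true ∧
                PySem.Chars.islower (PySem.List.pyGetD l0 (ic.1 - 1) ' ') = true)) ∧ s.1 ≠ []
                    then ['.', PySem.Chars.lowerChar ic.2]
                    else [PySem.Chars.lowerChar ic.2]), false)))
      ([], false)).1 =
    pvH ((PySem.List.enumerate l0 0).flatMap (pvContrib l0)) := by
  rw [List.foldl_ext _ (fun s ic => (pvContrib l0 ic).foldl pvM s) ([], false)
    (fun s ic _ => pvB_step l0 ic s)]
  rw [← List.foldl_flatMap]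
  exact pvFoldM_nil _ false

-- ===== VERDICT (by name: the statement is the Claim_ definition above) =====
theorem convert_to_dot_case_spec : Claim_equal_convert_to_dot_case := by
  intro input_string _
  unfold Spec_convert_to_dot_case convert_to_dot_case convert_to_dot_case_alt
  by_cases hemp : input_string.toList.isEmpty
  · rw [if_pos hemp]
    rw [List.isEmpty_iff] at hemp
    rw [hemp]
    rfl
  · rw [if_neg hemp]
    simp only []
    rw [pvLowerChain, pvA_result, pvLoop_h _ _ (Nat.lt_succ_self _), pvB_fold]
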